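-- pv_equiv track=rewrite | github.com/dreossi/analyzeNN | accuracy.py | duplicate_false_positive
-- ===== SOURCE A (Python) =====
-- def duplicate_false_positive(detects, n_gt):
--     '''Correct double false positives'''
--     for i in range(n_gt):
--         first_occ = True
--         for j in range(len(detects)):
--             if i == detects[j]:
--                 if first_occ:
--                     first_occ = False
--                 else:
--                     detects[j] = -1
--     return detects
-- ===== SOURCE B (Python) =====
-- def duplicate_false_positive(detects, n_gt):
--     '''Correct double false positives'''
--     seen = set()
--     for j, v in enumerate(detects):
--         if 0 <= v < n_gt:
--             if v in seen:
--                 detects[j] = -1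
--             else:
--                 seen.add(v)
--     return detects
-- ===== Notes on version B (the rewrite author's own statement) =====
-- stated objective: faster
-- what changed: Replaces the nested scan (for every candidate value 0..n_gt-1, rescan all of detects) by a single pass over detects that keeps a set of in-range values already seen and marks repeats as -1.
import Mathlib
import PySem

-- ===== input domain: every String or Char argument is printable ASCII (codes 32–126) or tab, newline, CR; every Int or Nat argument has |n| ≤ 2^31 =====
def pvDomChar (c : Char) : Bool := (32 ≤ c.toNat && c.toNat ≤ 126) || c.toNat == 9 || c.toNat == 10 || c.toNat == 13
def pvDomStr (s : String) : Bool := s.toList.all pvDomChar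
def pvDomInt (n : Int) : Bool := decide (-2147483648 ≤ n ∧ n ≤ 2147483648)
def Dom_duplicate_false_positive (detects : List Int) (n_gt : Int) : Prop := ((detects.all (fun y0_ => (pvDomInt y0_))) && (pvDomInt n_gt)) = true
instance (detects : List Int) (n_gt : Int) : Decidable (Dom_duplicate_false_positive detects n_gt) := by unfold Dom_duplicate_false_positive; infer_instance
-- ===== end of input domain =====

-- B replaces A's nested scan (for each value in range(n_gt), rescan detects) by one pass over
-- detects with a seen-set, marking repeated in-range values -1 (objective: faster, asymptotic).
-- Both Pythons mutate `detects` in place the same way and return it; equivalence is about the return value.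


-- ===== PORT A =====
-- inner 'for j in range(len(detects))' loop of A, carrying first_occ; the in-place updates
-- detects[j] = -1 become rebuilding the list position by position (exact: j covers every index once, in order)
def pvInnerA (i : Int) : List Int → Bool → List Int
  | [], _ => []
  | d :: rest, first_occ =>
    if i = d then
      if first_occ then d :: pvInnerA i rest false
      else (-1) :: pvInnerA i rest false
    else d :: pvInnerA i rest first_occ

def duplicate_false_positive (detects : List Int) (n_gt : Int) : List Int :=
  (PySem.List.pyRange 0 n_gt 1).foldl (fun d i => pvInnerA i d true) detects

-- ===== PORT B =====
-- single pass of Source B: walk detects once with the seen set, in-place detects[j] = -1 becomes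
-- rebuilding position by position
def pvAltLoop (n_gt : Int) : List Int → PySem.Set Int → List Int
  | [], _ => []
  | v :: rest, seen =>
    if 0 ≤ v ∧ v < n_gt then
      if PySem.Set.contains seen v then (-1) :: pvAltLoop n_gt rest seen
      else v :: pvAltLoop n_gt rest (PySem.Set.add seen v)
    else v :: pvAltLoop n_gt rest seen

def duplicate_false_positive_alt (detects : List Int) (n_gt : Int) : List Int :=
  pvAltLoop n_gt detects PySem.Set.empty

-- ===== PRECONDITION & SPEC =====
def Spec_duplicate_false_positive (detects : List Int) (n_gt : Int) (out : List Int) : Prop := out = duplicate_false_positive_alt detects n_gt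
instance (detects : List Int) (n_gt : Int) (out : List Int) : Decidable (Spec_duplicate_false_positive detects n_gt out) := by unfold Spec_duplicate_false_positive; infer_instance

-- ===== CLAIM (what is proved, stated in full; the proofs are below) =====
def Claim_equal_duplicate_false_positive : Prop := ∀ (detects : List Int) (n_gt : Int), Dom_duplicate_false_positive detects n_gt → Spec_duplicate_false_positive detects n_gt (duplicate_false_positive detects n_gt)

-- ===== LEMMAS AND PROOFS =====

-- step of A's outer fold, generalized with a "pre" list P of values already known to occur earlier
def pvStep (P : List Int) (i : Int) (d : List Int) : List Int :=
  if i ∈ P then d.map (fun x => if x = i then -1 else x) else pvInnerA i d true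

-- the common normal form: mark v → -1 iff v occurred in the prefix P and v ∈ R
def pvMarked (R : List Int) : List Int → List Int → List Int
  | _, [] => []
  | P, v :: t => (if v ∈ P ∧ v ∈ R then -1 else v) :: pvMarked R (P ++ [v]) t

theorem pvFoldl_congr {α β : Type} (l : List β) (f g : α → β → α) (init : α)
    (h : ∀ a, ∀ b ∈ l, f a b = g a b) : l.foldl f init = l.foldl g init := by
  induction l generalizing init with
  | nil => rfl
  | cons b t ih =>
    rw [List.foldl_cons, List.foldl_cons, h init b (by simp)]
    exact ih _ (fun a c hc => h a c (by simp [hc]))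

theorem pvInnerA_false (i : Int) (l : List Int) :
    pvInnerA i l false = l.map (fun x => if x = i then -1 else x) := by
  induction l with
  | nil => rfl
  | cons h t ih =>
    by_cases hi : i = h
    · subst hi; simp [pvInnerA, ih]
    · have hi' : ¬ (h = i) := fun e => hi e.symm
      simp [pvInnerA, hi, hi', ih]

theorem pvStep_congr (P Q : List Int) (hPQ : ∀ x, x ∈ P ↔ x ∈ Q) (i : Int) (d : List Int) :
    pvStep P i d = pvStep Q i d := by
  unfold pvStep
  by_cases h : i ∈ P
  · rw [if_pos h, if_pos ((hPQ i).1 h)]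
  · rw [if_neg h, if_neg (fun hq => h ((hPQ i).2 hq))]

theorem pvFold_neg_head (R P : List Int) (t : List Int) (hR : ∀ i ∈ R, 0 ≤ i) :
    R.foldl (fun d i => pvStep P i d) ((-1) :: t) =
      (-1) :: R.foldl (fun d i => pvStep P i d) t := by
  induction R generalizing t with
  | nil => rfl
  | cons i R' ih =>
    have hi : (0 : Int) ≤ i := hR i (by simp)
    have hstep : pvStep P i ((-1) :: t) = (-1) :: pvStep P i t := by
      unfold pvStep
      by_cases h : i ∈ P
      · simp [h]
      · have hne : ¬ (i = (-1 : Int)) := by omega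
        simp [h, pvInnerA, hne]
    rw [List.foldl_cons, hstep, List.foldl_cons,
      ih (pvStep P i t) (fun j hj => hR j (List.mem_cons_of_mem i hj))]

theorem pvFold_cons (R : List Int) (P : List Int) (v : Int) (t : List Int)
    (hR : ∀ i ∈ R, 0 ≤ i) (hnd : R.Nodup) :
    R.foldl (fun d i => pvStep P i d) (v :: t) =
      (if v ∈ P ∧ v ∈ R then -1 else v) ::
        R.foldl (fun d i => pvStep (P ++ [v]) i d) t := by
  induction R generalizing t with
  | nil => simp
  | cons i R' ih =>
    have hR' : ∀ j ∈ R', 0 ≤ j := fun j hj => hR j (List.mem_cons_of_mem i hj)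
    have hnd' : R'.Nodup := (List.nodup_cons.mp hnd).2
    have hiR' : i ∉ R' := (List.nodup_cons.mp hnd).1
    rw [List.foldl_cons, List.foldl_cons]
    by_cases hP : i ∈ P
    · by_cases hv : v = i
      · -- head becomes -1 (v ∈ P and v = i ∈ i::R')
        subst hv
        have h1 : pvStep P v (v :: t) = (-1) :: (t.map (fun x => if x = v then -1 else x)) := by
          simp [pvStep, hP]
        rw [h1, pvFold_neg_head R' P _ hR']
        rw [if_pos ⟨hP, by simp⟩]
        congr 1
        have hc : pvStep (P ++ [v]) v t = t.map (fun x => if x = v then -1 else x) := by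
          simp [pvStep]
        rw [hc]
        exact pvFoldl_congr R' _ _ _ (fun d j _ => pvStep_congr P (P ++ [v])
          (fun x => ⟨fun h => by simp [h], fun h => by
            rcases List.mem_append.mp h with h | h
            · exact h
            · simp at h; rw [h]; exact hP⟩) j d)
      · -- head unaffected by map (v ≠ i), tail mapped
        have h1 : pvStep P i (v :: t) = v :: (t.map (fun x => if x = i then -1 else x)) := by
          simp [pvStep, hP, hv]
        rw [h1, ih (t.map (fun x => if x = i then -1 else x)) hR' hnd']
        have hmem : (v ∈ P ∧ v ∈ i :: R') ↔ (v ∈ P ∧ v ∈ R') := by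
          constructor
          · rintro ⟨h2, h3⟩
            refine ⟨h2, ?_⟩
            rcases List.mem_cons.mp h3 with h | h
            · exact absurd h hv
            · exact h
          · rintro ⟨h2, h3⟩; exact ⟨h2, List.mem_cons_of_mem i h3⟩
        rw [if_congr hmem rfl rfl]
        congr 1
        have hc : pvStep (P ++ [v]) i t = t.map (fun x => if x = i then -1 else x) := by
          simp [pvStep, hP]
        rw [hc]
    · by_cases hv : i = v
      · -- first occurrence kept, tail gets all later v's marked
        subst hv
        have h1 : pvStep P i (i :: t) = i :: (t.map (fun x => if x = i then -1 else x)) := by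
          simp [pvStep, hP, pvInnerA, pvInnerA_false]
        rw [h1, ih (t.map (fun x => if x = i then -1 else x)) hR' hnd']
        rw [if_neg (fun h => hP h.1), if_neg (fun h => hP h.1)]
        congr 1
        have hc : pvStep (P ++ [i]) i t = t.map (fun x => if x = i then -1 else x) := by
          simp [pvStep]
        rw [hc]
      · -- i irrelevant for head; tail keeps first_occ = true
        have h1 : pvStep P i (v :: t) = v :: pvInnerA i t true := by
          simp [pvStep, hP, pvInnerA, hv]
        rw [h1, ih (pvInnerA i t true) hR' hnd']
        have hmem : (v ∈ P ∧ v ∈ i :: R') ↔ (v ∈ P ∧ v ∈ R') := by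
          constructor
          · rintro ⟨h2, h3⟩
            refine ⟨h2, ?_⟩
            rcases List.mem_cons.mp h3 with h | h
            · exact absurd h.symm hv
            · exact h
          · rintro ⟨h2, h3⟩; exact ⟨h2, List.mem_cons_of_mem i h3⟩
        rw [if_congr hmem rfl rfl]
        congr 1
        have hc : pvStep (P ++ [v]) i t = pvInnerA i t true := by
          have hiPv : i ∉ P ++ [v] := by simp [hP, hv]
          simp [pvStep, hiPv]
        rw [hc]

theorem pvFold_nil (R P : List Int) : R.foldl (fun d i => pvStep P i d) [] = [] := by
  induction R with
  | nil => rfl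
  | cons i R' ih =>
    rw [List.foldl_cons]
    have h0 : pvStep P i [] = [] := by
      unfold pvStep; by_cases h : i ∈ P <;> simp [h, pvInnerA]
    rw [h0, ih]

theorem pvFold_marked (R : List Int) (hR : ∀ i ∈ R, 0 ≤ i) (hnd : R.Nodup)
    (l : List Int) (P : List Int) :
    R.foldl (fun d i => pvStep P i d) l = pvMarked R P l := by
  induction l generalizing P with
  | nil => rw [pvFold_nil]; rfl
  | cons v t ih =>
    rw [pvFold_cons R P v t hR hnd, ih (P ++ [v])]
    rfl

theorem pvAlt_marked (n_gt : Int) (l : List Int) (seen : PySem.Set Int) (P : List Int)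
    (hinv : ∀ w : Int, 0 ≤ w → w < n_gt → (w ∈ seen ↔ w ∈ P)) :
    pvAltLoop n_gt l seen = pvMarked (PySem.List.pyRange 0 n_gt 1) P l := by
  induction l generalizing seen P with
  | nil => rfl
  | cons v t ih =>
    unfold pvAltLoop pvMarked
    by_cases hr : 0 ≤ v ∧ v < n_gt
    · rw [if_pos hr]
      have hvR : v ∈ PySem.List.pyRange 0 n_gt 1 := by
        rw [PySem.List.mem_pyRange_one]; exact hr
      by_cases hs : PySem.Set.contains seen v
      · have hvseen : v ∈ seen := by simpa [PySem.Set.contains] using hs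
        have hvP : v ∈ P := (hinv v hr.1 hr.2).1 hvseen
        rw [if_pos hs, if_pos ⟨hvP, hvR⟩]
        congr 1
        exact ih seen (P ++ [v]) (fun w hw1 hw2 => by
          rw [hinv w hw1 hw2]
          constructor
          · intro h; exact List.mem_append.mpr (Or.inl h)
          · intro h
            rcases List.mem_append.mp h with h | h
            · exact h
            · simp at h; rw [h]; exact hvP)
      · have hvseen : v ∉ seen := by simpa [PySem.Set.contains] using hs
        have hvP : v ∉ P := fun h => hvseen ((hinv v hr.1 hr.2).2 h)
        rw [if_neg hs, if_neg (fun h => hvP h.1)]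
        congr 1
        exact ih (PySem.Set.add seen v) (P ++ [v]) (fun w hw1 hw2 => by
          rw [PySem.Set.mem_add]
          constructor
          · rintro (h | h)
            · exact List.mem_append.mpr (Or.inl ((hinv w hw1 hw2).1 h))
            · exact List.mem_append.mpr (Or.inr (by simp [h]))
          · intro h
            rcases List.mem_append.mp h with h | h
            · exact Or.inl ((hinv w hw1 hw2).2 h)
            · simp at h; exact Or.inr h)
    · rw [if_neg hr]
      have hvR : v ∉ PySem.List.pyRange 0 n_gt 1 := by
        rw [PySem.List.mem_pyRange_one]; omega
      rw [if_neg (fun h => hvR h.2)]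
      congr 1
      exact ih seen (P ++ [v]) (fun w hw1 hw2 => by
        rw [hinv w hw1 hw2]
        constructor
        · intro h; exact List.mem_append.mpr (Or.inl h)
        · intro h
          rcases List.mem_append.mp h with h | h
          · exact h
          · simp at h; exact absurd ⟨h ▸ hw1, h ▸ hw2⟩ hr)

-- ===== VERDICT (by name: the statement is the Claim_ definition above) =====
theorem duplicate_false_positive_spec : Claim_equal_duplicate_false_positive := by
  intro detects n_gt _
  unfold Spec_duplicate_false_positive duplicate_false_positive duplicate_false_positive_alt
  have hR : ∀ i ∈ PySem.List.pyRange 0 n_gt 1, (0 : Int) ≤ i := by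
    intro i hi; rw [PySem.List.mem_pyRange_one] at hi; exact hi.1
  have hnd := PySem.List.nodup_pyRange_one (a := 0) (b := n_gt)
  have hA : (PySem.List.pyRange 0 n_gt 1).foldl (fun d i => pvInnerA i d true) detects
      = (PySem.List.pyRange 0 n_gt 1).foldl (fun d i => pvStep [] i d) detects := by
    apply pvFoldl_congr
    intro d i _; simp [pvStep]
  rw [hA, pvFold_marked _ hR hnd detects []]
  rw [pvAlt_marked n_gt detects PySem.Set.empty [] (fun w _ _ => by simp [PySem.Set.empty])]
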